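-- pv_equiv track=rewrite | github.com/Yoon-men/CodingTest | BaekJoon/1379.py | joyGo
-- ===== SOURCE A (Python) =====
-- from typing import List, Tuple
-- from heapq import heappush, heappop
--
-- def joyGo(N: int, classes: List[Tuple[int, int, int]]) -> List[int] :
--     ans_list = [0] * (N+1)
--     classes.sort(key=lambda x: (x[1], x[2]))
--
--     ans_list[0] = 1
--     ans_list[classes[0][0]] = ans_list[0]
--     q = [(classes[0][2], classes[0][0])]
--     for i in range(1, N) :
--         n, s, e = classes[i]
--         if s < q[0][0] :
--             ans_list[0] += 1
--             ans_list[n] = ans_list[0]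
--             heappush(q, (e, n))
--         else :
--             ans_list[n] = ans_list[q[0][1]]
--             heappop(q)
--             heappush(q, (e, n))
--
--     return ans_list
-- ===== SOURCE B (Python) =====
-- from typing import List, Tuple
--
-- # B: same room-assignment greedy, but the active rooms live in a plain list scanned
-- # for its minimum instead of a binary heap.  Like A, it sorts `classes` in place.
-- def joyGo(N: int, classes: List[Tuple[int, int, int]]) -> List[int]:
--     ans_list = [0] * (N + 1)
--     classes.sort(key=lambda x: (x[1], x[2]))
--
--     ans_list[0] = 1
--     ans_list[classes[0][0]] = 1
--     rooms = [(classes[0][2], classes[0][0])]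
--     for n, s, e in classes[1:N]:
--         j = min(range(len(rooms)), key=lambda k: rooms[k])
--         if s < rooms[j][0]:
--             ans_list[0] += 1
--             ans_list[n] = ans_list[0]
--             rooms.append((e, n))
--         else:
--             ans_list[n] = ans_list[rooms[j][1]]
--             rooms[j] = (e, n)
--
--     return ans_list
-- ===== Notes on version B (the rewrite author's own statement) =====
-- stated objective: alternative
-- what changed: The binary heap (heapq push/pop with sift-up/sift-down) holding the active rooms is replaced by a plain list that is linearly scanned for its minimum (end, id) entry each iteration, updated in place or appended; the sort, ans_list bookkeeping and strict-< comparison are unchanged.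
import Mathlib
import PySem

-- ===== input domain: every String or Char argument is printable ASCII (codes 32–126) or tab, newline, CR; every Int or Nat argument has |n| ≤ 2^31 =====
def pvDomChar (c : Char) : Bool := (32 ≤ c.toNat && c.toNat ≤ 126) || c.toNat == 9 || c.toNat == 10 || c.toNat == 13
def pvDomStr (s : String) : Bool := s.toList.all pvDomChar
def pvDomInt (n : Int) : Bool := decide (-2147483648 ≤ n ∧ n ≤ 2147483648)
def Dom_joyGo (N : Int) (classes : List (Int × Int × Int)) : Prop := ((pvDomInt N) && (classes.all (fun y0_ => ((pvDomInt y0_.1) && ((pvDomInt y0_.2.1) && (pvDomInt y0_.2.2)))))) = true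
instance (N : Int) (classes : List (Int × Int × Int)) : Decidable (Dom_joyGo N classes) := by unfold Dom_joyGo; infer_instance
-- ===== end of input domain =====

-- B replaces A's heapq priority queue by a plain room list scanned for its minimum
-- (objective: alternative/simpler mechanics, not faster).  Like A, the Python B sorts
-- `classes` in place; the equivalence proved here is about the RETURN value.

-- ===== PORT A =====

-- Python tuple comparison (e, n) < (e', n') on int pairs
def pvPlt (a b : Int × Int) : Bool :=
  decide (a.1 < b.1) || (a.1 == b.1 && decide (a.2 < b.2))

def pvD0 : Int × Int := (0, 0)

-- heapq._siftdown(heap, startpos, pos) with heap[pos] conceptually holding newitem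
def pvSiftdown (q : List (Int × Int)) (startpos pos : Nat) (newitem : Int × Int) :
    List (Int × Int) :=
  if _h : startpos < pos then
    if pvPlt newitem (q.getD ((pos - 1) / 2) pvD0) then
      pvSiftdown (q.set pos (q.getD ((pos - 1) / 2) pvD0)) startpos ((pos - 1) / 2) newitem
    else q.set pos newitem
  else q.set pos newitem
termination_by pos
decreasing_by omega

-- heapq._siftup(heap, pos) loop (childpos chosen as in CPython), then the final _siftdown
def pvSiftupLoop (q : List (Int × Int)) (startpos pos : Nat) (newitem : Int × Int) :
    List (Int × Int) :=
  if _h : 2 * pos + 1 < q.length then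
    if _h2 : 2 * pos + 2 < q.length ∧
        pvPlt (q.getD (2 * pos + 1) pvD0) (q.getD (2 * pos + 2) pvD0) = false then
      pvSiftupLoop (q.set pos (q.getD (2 * pos + 2) pvD0)) startpos (2 * pos + 2) newitem
    else
      pvSiftupLoop (q.set pos (q.getD (2 * pos + 1) pvD0)) startpos (2 * pos + 1) newitem
  else pvSiftdown (q.set pos newitem) startpos pos newitem
termination_by q.length - pos
decreasing_by all_goals simp [List.length_set]; omega

-- heappush(q, item): append, then sift up from the last position
def pvHeappush (q : List (Int × Int)) (item : Int × Int) : List (Int × Int) :=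
  pvSiftdown (q ++ [item]) 0 q.length item

-- heappop(q): returns (popped item, remaining heap)
def pvHeappop (q : List (Int × Int)) : (Int × Int) × List (Int × Int) :=
  let lastelt := q.getLastD pvD0
  let rest := q.dropLast
  if rest.isEmpty then (lastelt, rest)
  else (rest.getD 0 pvD0, pvSiftupLoop (rest.set 0 lastelt) 0 0 lastelt)

-- one iteration of A's loop body, applied to classes[i]
def pvBodyA (st : List Int × List (Int × Int)) (c : Int × Int × Int) :
    List Int × List (Int × Int) :=
  let top := st.2.getD 0 pvD0
  if c.2.1 < top.1 then
    let cnt := PySem.List.pyGetD st.1 0 0 + 1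
    (PySem.List.pySetD (PySem.List.pySetD st.1 0 cnt) c.1 cnt, pvHeappush st.2 (c.2.2, c.1))
  else
    (PySem.List.pySetD st.1 c.1 (PySem.List.pyGetD st.1 top.2 0),
     pvHeappush (pvHeappop st.2).2 (c.2.2, c.1))

def joyGo (N : Int) (classes : List (Int × Int × Int)) : List Int :=
  let cs := PySem.List.sorted2 classes (fun c => c.2.1) (fun c => c.2.2)
  let ans1 := PySem.List.pySetD (List.replicate (N + 1).toNat 0) 0 1
  let c0 := cs.getD 0 (0, 0, 0)
  let ans2 := PySem.List.pySetD ans1 c0.1 (PySem.List.pyGetD ans1 0 0)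
  ((PySem.List.pyRange 1 N).foldl
      (fun st i => pvBodyA st (PySem.List.pyGetD cs i (0, 0, 0)))
      (ans2, [(c0.2.2, c0.1)])).1

-- ===== PORT B =====

-- j = min(range(len(rooms)), key=lambda k: rooms[k]) : first index of the minimal entry
def pvArgmin (rooms : List (Int × Int)) : Nat :=
  (List.range rooms.length).foldl
    (fun best k => if pvPlt (rooms.getD k pvD0) (rooms.getD best pvD0) then k else best) 0

-- one iteration of B's loop body, applied to a class c
def pvBodyB (st : List Int × List (Int × Int)) (c : Int × Int × Int) :
    List Int × List (Int × Int) :=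
  let j := pvArgmin st.2
  let m := st.2.getD j pvD0
  if c.2.1 < m.1 then
    let cnt := PySem.List.pyGetD st.1 0 0 + 1
    (PySem.List.pySetD (PySem.List.pySetD st.1 0 cnt) c.1 cnt, st.2 ++ [(c.2.2, c.1)])
  else
    (PySem.List.pySetD st.1 c.1 (PySem.List.pyGetD st.1 m.2 0), st.2.set j (c.2.2, c.1))

def joyGo_alt (N : Int) (classes : List (Int × Int × Int)) : List Int :=
  let cs := PySem.List.sorted2 classes (fun c => c.2.1) (fun c => c.2.2)
  let ans1 := PySem.List.pySetD (List.replicate (N + 1).toNat 0) 0 1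
  let c0 := cs.getD 0 (0, 0, 0)
  let ans2 := PySem.List.pySetD ans1 c0.1 1
  ((PySem.List.slice cs (some 1) (some N)).foldl pvBodyB (ans2, [(c0.2.2, c0.1)])).1

-- ===== PRECONDITION & SPEC =====
-- Pre_ is exactly the set of inputs on which Python A returns normally: N must be a
-- valid count (0 ≤ N ≤ len(classes), classes nonempty), and the class ids the loop
-- actually touches — those of the N earliest classes in the (start, end) sort order
-- (the first one even when N = 0) — must be valid Python indices into ans_list,
-- i.e. lie in [-(N+1), N]; otherwise A raises an IndexError.
def Pre_joyGo (N : Int) (classes : List (Int × Int × Int)) : Prop :=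
  0 ≤ N ∧ N ≤ (classes.length : Int) ∧ classes ≠ [] ∧
  ∀ c ∈ (PySem.List.sorted2 classes (fun c => c.2.1) (fun c => c.2.2)).take (max N.toNat 1),
    -(N + 1) ≤ c.1 ∧ c.1 ≤ N
instance (N : Int) (classes : List (Int × Int × Int)) : Decidable (Pre_joyGo N classes) := by
  unfold Pre_joyGo; infer_instance

def pvWitness_joyGo : Int × (List (Int × Int × Int)) := (3, [(1, 2, 4), (2, 1, 3), (3, 3, 5)])

def Spec_joyGo (N : Int) (classes : List (Int × Int × Int)) (out : List Int) : Prop :=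
  out = joyGo_alt N classes
instance (N : Int) (classes : List (Int × Int × Int)) (out : List Int) :
    Decidable (Spec_joyGo N classes out) := by unfold Spec_joyGo; infer_instance

-- ===== CLAIM (what is proved, stated in full; the proofs are below) =====
def Claim_equal_joyGo : Prop := ∀ (N : Int) (classes : List (Int × Int × Int)),
  Dom_joyGo N classes → Pre_joyGo N classes → Spec_joyGo N classes (joyGo N classes)

-- ===== LEMMAS AND PROOFS =====

-- Order facts about pvPlt (Python's tuple <)
theorem pvPlt_true_iff (a b : Int × Int) :
    pvPlt a b = true ↔ (a.1 < b.1 ∨ (a.1 = b.1 ∧ a.2 < b.2)) := by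
  simp [pvPlt]

theorem pvPlt_false_iff (a b : Int × Int) :
    pvPlt a b = false ↔ ¬(a.1 < b.1 ∨ (a.1 = b.1 ∧ a.2 < b.2)) := by
  rw [← pvPlt_true_iff]; cases h : pvPlt a b <;> simp

theorem pvPlt_irrefl (a : Int × Int) : pvPlt a a = false := by
  rw [pvPlt_false_iff]; omega

theorem pvPlt_asymm {a b : Int × Int} (h : pvPlt a b = true) : pvPlt b a = false := by
  rw [pvPlt_true_iff] at h; rw [pvPlt_false_iff]; omega

theorem pvPlt_leTrans {a b c : Int × Int} (h1 : pvPlt b a = false) (h2 : pvPlt c b = false) :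
    pvPlt c a = false := by
  rw [pvPlt_false_iff] at *; omega

theorem pvPlt_connex {a b : Int × Int} (h1 : pvPlt a b = false) (h2 : pvPlt b a = false) :
    a = b := by
  rw [pvPlt_false_iff] at *
  have : a.1 = b.1 ∧ a.2 = b.2 := by omega
  exact Prod.ext this.1 this.2

theorem pvPlt_notlt_of_lt_of_notlt {u x p : Int × Int} (h1 : pvPlt u p = false)
    (h2 : pvPlt x p = true) : pvPlt u x = false := by
  rw [pvPlt_false_iff] at *; rw [pvPlt_true_iff] at h2; omega

-- getD / set / count toolkit
theorem pv_getD_set_self {α : Type} (q : List α) (i : Nat) (v d : α) (h : i < q.length) :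
    (q.set i v).getD i d = v := by
  simp [List.getD_eq_getElem?_getD, List.getElem?_set_self h]

theorem pv_getD_set_ne {α : Type} (q : List α) (i j : Nat) (v d : α) (h : i ≠ j) :
    (q.set i v).getD j d = q.getD j d := by
  simp [List.getD_eq_getElem?_getD, List.getElem?_set_ne h]

theorem pv_count_set (q : List (Int × Int)) (i : Nat) (v x : Int × Int) (h : i < q.length) :
    (q.set i v).count x + (if q.getD i pvD0 = x then 1 else 0)
      = q.count x + (if v = x then 1 else 0) := by
  have hset : q.set i v = q.take i ++ v :: q.drop (i + 1) := by
    rw [List.set_eq_take_append_cons_drop, if_pos h]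
  have hq : q = q.take i ++ q.getD i pvD0 :: q.drop (i + 1) := by
    conv_lhs => rw [← List.take_append_drop i q, List.drop_eq_getElem_cons h]
    rw [List.getD_eq_getElem _ _ h]
  have h1 : (q.set i v).count x
      = (q.take i).count x + ((if v = x then 1 else 0) + (q.drop (i + 1)).count x) := by
    rw [hset]; simp [List.count_append, List.count_cons, beq_iff_eq]; omega
  have h2 : q.count x
      = (q.take i).count x + ((if q.getD i pvD0 = x then 1 else 0) + (q.drop (i + 1)).count x) := by
    conv_lhs => rw [hq]
    simp [List.count_append, List.count_cons, beq_iff_eq]; omega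
  omega

theorem pv_perm_set_set (q : List (Int × Int)) (p r : Nat) (v : Int × Int)
    (hp : p < q.length) (hr : r < q.length) (hne : p ≠ r) :
    ((q.set p (q.getD r pvD0)).set r v).Perm (q.set p v) := by
  rw [List.perm_iff_count]
  intro x
  set q1 := q.set p (q.getD r pvD0) with hq1
  have hl1 : q1.length = q.length := by simp [hq1]
  have hgr : q1.getD r pvD0 = q.getD r pvD0 := pv_getD_set_ne q p r _ pvD0 hne
  have c1 := pv_count_set q1 r v x (by omega)
  have c2 := pv_count_set q p (q.getD r pvD0) x hp
  have c3 := pv_count_set q p v x hp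
  rw [hgr] at c1
  rw [← hq1] at c2
  split_ifs at c1 c2 c3 <;> omega

theorem pv_set_append_last {α : Type} (q : List α) (x v : α) :
    (q ++ [x]).set q.length v = q ++ [v] := by
  induction q with
  | nil => rfl
  | cons a t ih => simp [ih]

-- heap predicate: every non-root entry is ≥ its parent
def PvIsHeap (q : List (Int × Int)) : Prop :=
  ∀ i : Nat, 0 < i → i < q.length →
    pvPlt (q.getD i pvD0) (q.getD ((i - 1) / 2) pvD0) = false

-- invariant of the bubble-up phase: placing x at pos gives a heap except possibly the
-- edge pos → parent, and the children of pos are ≥ the value above pos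
def PvUpInv (q : List (Int × Int)) (pos : Nat) (x : Int × Int) : Prop :=
  (∀ i, 0 < i → i < q.length → i ≠ pos →
    pvPlt ((q.set pos x).getD i pvD0) ((q.set pos x).getD ((i - 1) / 2) pvD0) = false) ∧
  (0 < pos → ∀ i, i < q.length → (i - 1) / 2 = pos →
    pvPlt (q.getD i pvD0) (q.getD ((pos - 1) / 2) pvD0) = false)

-- invariant of the trickle-down phase: q is a heap except the edges touching the hole pos
def PvDownInv (q : List (Int × Int)) (pos : Nat) : Prop :=
  (∀ i, 0 < i → i < q.length → i ≠ pos → (i - 1) / 2 ≠ pos →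
    pvPlt (q.getD i pvD0) (q.getD ((i - 1) / 2) pvD0) = false) ∧
  (0 < pos → ∀ i, i < q.length → (i - 1) / 2 = pos →
    pvPlt (q.getD i pvD0) (q.getD ((pos - 1) / 2) pvD0) = false)

theorem pvSiftdown_perm (pos : Nat) (q : List (Int × Int)) (x : Int × Int)
    (h : pos < q.length) : (pvSiftdown q 0 pos x).Perm (q.set pos x) := by
  induction pos using Nat.strong_induction_on generalizing q with
  | _ pos ih =>
    rw [pvSiftdown]
    split
    · next hp =>
      split
      · next hx =>
        refine (ih ((pos - 1) / 2) (by omega) _ (by simp; omega)).trans ?_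
        exact pv_perm_set_set q pos ((pos - 1) / 2) x h (by omega) (by omega)
      · exact List.Perm.refl _
    · exact List.Perm.refl _

theorem pvSiftdown_heap (pos : Nat) (q : List (Int × Int)) (x : Int × Int)
    (h : pos < q.length) (hinv : PvUpInv q pos x) : PvIsHeap (pvSiftdown q 0 pos x) := by
  induction pos using Nat.strong_induction_on generalizing q with
  | _ pos ih =>
    rw [pvSiftdown]
    split
    · next hp =>
      split
      · next hx =>
        -- bubble one step up: hole moves from pos to parentpos := (pos-1)/2
        refine ih ((pos - 1) / 2) (by omega) _ (by simp; omega) ?_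
        constructor
        · intro i hi hlen hne
          simp only [List.length_set] at hlen
          rcases eq_or_ne i pos with hip | hip
          · -- the filled old hole: parent value sits at pos, x above it at parentpos
            rw [hip]
            have e1 : ((q.set pos (q.getD ((pos - 1) / 2) pvD0)).set ((pos - 1) / 2) x).getD pos pvD0
                = q.getD ((pos - 1) / 2) pvD0 := by
              rw [pv_getD_set_ne _ _ _ _ _ (by omega), pv_getD_set_self _ _ _ _ h]
            have e2 : ((q.set pos (q.getD ((pos - 1) / 2) pvD0)).set ((pos - 1) / 2) x).getD ((pos - 1) / 2) pvD0
                = x := pv_getD_set_self _ _ _ _ (by simp; omega)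
            rw [e1, e2]
            exact pvPlt_asymm hx
          · have ei : ((q.set pos (q.getD ((pos - 1) / 2) pvD0)).set ((pos - 1) / 2) x).getD i pvD0
                = q.getD i pvD0 := by
              rw [pv_getD_set_ne _ _ _ _ _ (by omega), pv_getD_set_ne _ _ _ _ _ (by omega)]
            rw [ei]
            rcases eq_or_ne ((i - 1) / 2) ((pos - 1) / 2) with hpp | hpp
            · -- parent of i is the new hole: need q[i] ≥ x
              have ep : ((q.set pos (q.getD ((pos - 1) / 2) pvD0)).set ((pos - 1) / 2) x).getD ((i - 1) / 2) pvD0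
                  = x := by rw [hpp]; exact pv_getD_set_self _ _ _ _ (by simp; omega)
              rw [ep]
              have h1 := hinv.1 i hi hlen hip
              rw [pv_getD_set_ne _ _ _ _ _ (by omega), hpp,
                  pv_getD_set_ne _ _ _ _ _ (by omega)] at h1
              exact pvPlt_notlt_of_lt_of_notlt h1 hx
            · rcases eq_or_ne ((i - 1) / 2) pos with hpi | hpi
              · -- i was a child of the old hole: clause 2 gives q[i] ≥ q[parentpos]
                have ep : ((q.set pos (q.getD ((pos - 1) / 2) pvD0)).set ((pos - 1) / 2) x).getD ((i - 1) / 2) pvD0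
                    = q.getD ((pos - 1) / 2) pvD0 := by
                  rw [hpi, pv_getD_set_ne _ _ _ _ _ (by omega), pv_getD_set_self _ _ _ _ h]
                rw [ep]
                exact hinv.2 hp i hlen hpi
              · -- an untouched edge
                have ep : ((q.set pos (q.getD ((pos - 1) / 2) pvD0)).set ((pos - 1) / 2) x).getD ((i - 1) / 2) pvD0
                    = q.getD ((i - 1) / 2) pvD0 := by
                  rw [pv_getD_set_ne _ _ _ _ _ (by omega), pv_getD_set_ne _ _ _ _ _ (by omega)]
                rw [ep]
                have h1 := hinv.1 i hi hlen hip
                rw [pv_getD_set_ne _ _ _ _ _ (by omega), pv_getD_set_ne _ _ _ _ _ (by omega)] at h1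
                exact h1
        · -- clause 2 for the new hole: children of parentpos ≥ its parent's value
          intro hpp i hlen hpar
          simp only [List.length_set] at hlen
          have hgp : (q.set pos (q.getD ((pos - 1) / 2) pvD0)).getD (((pos - 1) / 2 - 1) / 2) pvD0
              = q.getD (((pos - 1) / 2 - 1) / 2) pvD0 := pv_getD_set_ne _ _ _ _ _ (by omega)
          have hparent : pvPlt (q.getD ((pos - 1) / 2) pvD0) (q.getD (((pos - 1) / 2 - 1) / 2) pvD0) = false := by
            have h1 := hinv.1 ((pos - 1) / 2) (by omega) (by omega) (by omega)
            rwa [pv_getD_set_ne _ _ _ _ _ (by omega), pv_getD_set_ne _ _ _ _ _ (by omega)] at h1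
          rcases eq_or_ne i pos with hip | hip
          · rw [hip, hpar] at *
            rw [pv_getD_set_self _ _ _ _ h, hgp]
            exact hparent
          · rw [pv_getD_set_ne _ _ _ _ _ (by omega), hgp]
            have h1 := hinv.1 i (by omega) hlen hip
            rw [pv_getD_set_ne _ _ _ _ _ (by omega), hpar,
                pv_getD_set_ne _ _ _ _ _ (by omega)] at h1
            exact pvPlt_leTrans hparent h1
      · next hx =>
        -- loop exit: x is ≥ its parent, placing it closes the heap
        intro i hi hlen
        simp only [List.length_set] at hlen
        rcases eq_or_ne i pos with hip | hip
        · rw [hip, pv_getD_set_self _ _ _ _ h, pv_getD_set_ne _ _ _ _ _ (by omega)]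
          simpa using hx
        · exact hinv.1 i hi hlen hip
    · next hp =>
      -- pos = 0: no parent edge, clause 1 is the whole heap property
      have hp0 : pos = 0 := by omega
      subst hp0
      intro i hi hlen
      simp only [List.length_set] at hlen
      exact hinv.1 i hi hlen (by omega)

theorem pvSiftupLoop_perm (pos : Nat) (q : List (Int × Int)) (x : Int × Int)
    (h : pos < q.length) : (pvSiftupLoop q 0 pos x).Perm (q.set pos x) := by
  induction hn : q.length - pos using Nat.strong_induction_on generalizing q pos with
  | _ n ih =>
    rw [pvSiftupLoop]
    split
    · next hc =>
      split
      · next hc2 =>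
        refine (ih ((q.set pos (q.getD (2 * pos + 2) pvD0)).length - (2 * pos + 2))
            (by simp; omega) _ _ (by simp; omega) rfl).trans ?_
        exact pv_perm_set_set q pos (2 * pos + 2) x h (by omega) (by omega)
      · next hc2 =>
        refine (ih ((q.set pos (q.getD (2 * pos + 1) pvD0)).length - (2 * pos + 1))
            (by simp; omega) _ _ (by simp; omega) rfl).trans ?_
        exact pv_perm_set_set q pos (2 * pos + 1) x h (by omega) (by omega)
    · next hc =>
      refine (pvSiftdown_perm pos _ x (by simp; omega)).trans ?_
      rw [List.set_set]

-- one trickle-down step: moving the hole from pos to its smaller child c keeps PvDownInv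
theorem pv_downstep (q : List (Int × Int)) (pos c : Nat) (h : pos < q.length)
    (hlb : 2 * pos + 1 ≤ c) (hc : c < q.length) (hub : c ≤ 2 * pos + 2)
    (hmin : ∀ i, 2 * pos + 1 ≤ i → i ≤ 2 * pos + 2 → i < q.length → i ≠ c →
      pvPlt (q.getD i pvD0) (q.getD c pvD0) = false)
    (hinv : PvDownInv q pos) : PvDownInv (q.set pos (q.getD c pvD0)) c := by
  constructor
  · intro i hi hlen hne hpar
    simp only [List.length_set] at hlen
    rcases eq_or_ne i pos with hip | hip
    · rw [hip]
      rw [pv_getD_set_self _ _ _ _ h, pv_getD_set_ne _ _ _ _ _ (by omega)]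
      exact hinv.2 (by omega) c hc (by omega)
    · rw [pv_getD_set_ne _ _ _ _ _ (by omega)]
      rcases eq_or_ne ((i - 1) / 2) pos with hpp | hpp
      · rw [hpp, pv_getD_set_self _ _ _ _ h]
        exact hmin i (by omega) (by omega) hlen hne
      · rw [pv_getD_set_ne _ _ _ _ _ (by omega)]
        exact hinv.1 i hi hlen hip hpp
  · intro h0c i hlen hpar
    simp only [List.length_set] at hlen
    have hcp : (c - 1) / 2 = pos := by omega
    rw [hcp, pv_getD_set_self _ _ _ _ h, pv_getD_set_ne _ _ _ _ _ (by omega), ← hpar]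
    exact hinv.1 i (by omega) hlen (by omega) (by omega)

theorem pvSiftupLoop_heap (pos : Nat) (q : List (Int × Int)) (x : Int × Int)
    (h : pos < q.length) (hinv : PvDownInv q pos) : PvIsHeap (pvSiftupLoop q 0 pos x) := by
  induction hn : q.length - pos using Nat.strong_induction_on generalizing q pos with
  | _ n ih =>
    rw [pvSiftupLoop]
    split
    · next hc =>
      split
      · next hc2 =>
        -- hole moves to the right child 2*pos+2
        refine ih _ (by simp; omega) _ _ (by simp; omega) ?_ rfl
        refine pv_downstep q pos (2 * pos + 2) h (by omega) hc2.1 (by omega) ?_ hinv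
        intro i hi1 hi2 hlen hne
        have hi1' : i = 2 * pos + 1 := by omega
        rw [hi1']
        exact hc2.2
      · next hc2 =>
        -- hole moves to the left child 2*pos+1
        refine ih _ (by simp; omega) _ _ (by simp; omega) ?_ rfl
        refine pv_downstep q pos (2 * pos + 1) h (by omega) hc (by omega) ?_ hinv
        intro i hi1 hi2 hlen hne
        have hi2' : i = 2 * pos + 2 := by omega
        subst hi2'
        have ht : pvPlt (q.getD (2 * pos + 1) pvD0) (q.getD (2 * pos + 2) pvD0) = true := by
          cases h' : pvPlt (q.getD (2 * pos + 1) pvD0) (q.getD (2 * pos + 2) pvD0)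
          · exact absurd ⟨hlen, h'⟩ hc2
          · rfl
        exact pvPlt_asymm ht
    · next hc =>
      -- pos is a leaf: place x there and sift it up
      refine pvSiftdown_heap pos _ x (by simp; omega) ?_
      constructor
      · intro i hi hlen hne
        simp only [List.length_set] at hlen
        rw [List.set_set]
        have hpar : (i - 1) / 2 ≠ pos := by omega
        rw [pv_getD_set_ne _ _ _ _ _ (by omega), pv_getD_set_ne _ _ _ _ _ (by omega)]
        exact hinv.1 i hi hlen hne hpar
      · intro hp i hlen hpar
        simp only [List.length_set] at hlen
        omega

theorem pvHeappush_perm (q : List (Int × Int)) (x : Int × Int) :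
    (pvHeappush q x).Perm (x :: q) := by
  refine (pvSiftdown_perm q.length (q ++ [x]) x (by simp)).trans ?_
  rw [pv_set_append_last]
  simpa using (List.perm_middle (a := x) (l₁ := q) (l₂ := []))

theorem pvHeappush_heap (q : List (Int × Int)) (x : Int × Int) (h : PvIsHeap q) :
    PvIsHeap (pvHeappush q x) := by
  refine pvSiftdown_heap q.length (q ++ [x]) x (by simp) ?_
  constructor
  · intro i hi hlen hne
    have hlen' : i < q.length + 1 := by simpa using hlen
    rw [pv_set_append_last]
    have hil : i < q.length := by omega
    have e1 : (q ++ [x]).getD i pvD0 = q.getD i pvD0 := by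
      simp [List.getD_eq_getElem?_getD, List.getElem?_append_left hil]
    have e2 : (q ++ [x]).getD ((i - 1) / 2) pvD0 = q.getD ((i - 1) / 2) pvD0 := by
      simp [List.getD_eq_getElem?_getD, List.getElem?_append_left (show (i - 1) / 2 < q.length by omega)]
    rw [e1, e2]
    exact h i hi hil
  · intro hp i hlen hpar
    have hlen' : i < q.length + 1 := by simpa using hlen
    omega

theorem pv_getD_dropLast {α : Type} (l : List α) (j : Nat) (d : α) (h : j + 1 < l.length) :
    l.dropLast.getD j d = l.getD j d := by
  simp only [List.getD_eq_getElem?_getD, List.getElem?_dropLast]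
  rw [if_pos (by omega)]

theorem pvHeappop_spec (q : List (Int × Int)) (hq : PvIsHeap q) (hne : q ≠ []) :
    (pvHeappop q).1 = q.getD 0 pvD0 ∧ (pvHeappop q).2.Perm q.tail ∧
      PvIsHeap (pvHeappop q).2 := by
  rcases q with _ | ⟨a, t⟩
  · exact absurd rfl hne
  rcases t with _ | ⟨b, t'⟩
  · refine ⟨rfl, by simp [pvHeappop], ?_⟩
    intro i hi hlen
    simp [pvHeappop] at hlen
  · set t := b :: t' with ht
    have htne : t ≠ [] := by simp [ht]
    have hrest : (a :: t).dropLast = a :: t.dropLast := by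
      simp [List.dropLast_cons_of_ne_nil htne]
    have hlast : (a :: t).getLastD pvD0 = t.getLast htne := by
      rw [List.getLastD_eq_getLast?, List.getLast?_eq_some_getLast (h := by simp [ht])]
      simp [List.getLast_cons htne]
    have htl : 1 ≤ t.length := by simp [ht]
    have hdl : t.dropLast.length = t.length - 1 := by simp
    have hne' : ((a :: t).dropLast.isEmpty) = false := by rw [hrest]; rfl
    have hset : ((a :: t).dropLast.set 0 ((a :: t).getLastD pvD0))
        = t.getLast htne :: t.dropLast := by
      rw [hrest, hlast]; rfl
    have hperm_t : t.Perm (t.getLast htne :: t.dropLast) := by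
      conv_lhs => rw [← List.dropLast_concat_getLast htne]
      exact (List.perm_middle (a := t.getLast htne) (l₁ := t.dropLast) (l₂ := [])).trans
        (by simp)
    refine ⟨?_, ?_, ?_⟩
    · simp only [pvHeappop, hne']
      rw [hrest]; rfl
    · simp only [pvHeappop, hne']
      refine ((pvSiftupLoop_perm 0 _ _ (by rw [hset]; simp)).trans ?_)
      rw [List.set_set, hset]
      exact (List.Perm.symm hperm_t)
    · simp only [pvHeappop, hne']
      refine pvSiftupLoop_heap 0 _ _ (by rw [hset]; simp) ?_
      constructor
      · intro i hi hlen hne0 hpar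
        rw [hset] at hlen
        simp only [List.length_cons, hdl] at hlen
        have ei : ((a :: t).dropLast.set 0 ((a :: t).getLastD pvD0)).getD i pvD0
            = (a :: t).getD i pvD0 := by
          rw [pv_getD_set_ne _ _ _ _ _ (by omega)]
          exact pv_getD_dropLast _ _ _ (by simp; omega)
        have ep : ((a :: t).dropLast.set 0 ((a :: t).getLastD pvD0)).getD ((i - 1) / 2) pvD0
            = (a :: t).getD ((i - 1) / 2) pvD0 := by
          rw [pv_getD_set_ne _ _ _ _ _ (by omega)]
          exact pv_getD_dropLast _ _ _ (by simp; omega)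
        rw [ei, ep]
        exact hq i hi (by simp; omega)
      · intro hp
        exact absurd hp (by omega)

theorem pv_heap_root_min (q : List (Int × Int)) (hq : PvIsHeap q) :
    ∀ j, j < q.length → pvPlt (q.getD j pvD0) (q.getD 0 pvD0) = false := by
  intro j
  induction j using Nat.strong_induction_on with
  | _ j ih =>
    intro hj
    rcases Nat.eq_zero_or_pos j with h0 | h0
    · subst h0; exact pvPlt_irrefl _
    · exact pvPlt_leTrans (ih ((j - 1) / 2) (by omega) (by omega)) (hq j h0 hj)

theorem pvArgmin_spec (rooms : List (Int × Int)) (hne : rooms ≠ []) :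
    pvArgmin rooms < rooms.length ∧
      ∀ k, k < rooms.length →
        pvPlt (rooms.getD k pvD0) (rooms.getD (pvArgmin rooms) pvD0) = false := by
  have main : ∀ n, ((List.range n).foldl
        (fun best k => if pvPlt (rooms.getD k pvD0) (rooms.getD best pvD0) then k else best) 0 = 0
      ∨ (List.range n).foldl
        (fun best k => if pvPlt (rooms.getD k pvD0) (rooms.getD best pvD0) then k else best) 0 < n)
      ∧ ∀ k, k < n → pvPlt (rooms.getD k pvD0)
        (rooms.getD ((List.range n).foldl
          (fun best k => if pvPlt (rooms.getD k pvD0) (rooms.getD best pvD0) then k else best) 0) pvD0)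
          = false := by
    intro n
    induction n with
    | zero => exact ⟨Or.inl rfl, fun k hk => absurd hk (by omega)⟩
    | succ n ih =>
      rw [List.range_succ, List.foldl_append, List.foldl_cons, List.foldl_nil]
      cases hifc : pvPlt (rooms.getD n pvD0)
          (rooms.getD ((List.range n).foldl
            (fun best k => if pvPlt (rooms.getD k pvD0) (rooms.getD best pvD0) then k else best) 0) pvD0) with
      | true =>
        rw [if_pos rfl]
        refine ⟨Or.inr (by omega), fun k hk => ?_⟩
        rcases eq_or_ne k n with rfl | hkn
        · exact pvPlt_irrefl _
        · exact pvPlt_notlt_of_lt_of_notlt (ih.2 k (by omega)) hifc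
      | false =>
        rw [if_neg (by simp)]
        refine ⟨by rcases ih.1 with h | h <;> omega, fun k hk => ?_⟩
        rcases eq_or_ne k n with rfl | hkn
        · exact hifc
        · exact ih.2 k (by omega)
  have h0 : 0 < rooms.length := by
    cases rooms
    · exact absurd rfl hne
    · simp
  have := main rooms.length
  unfold pvArgmin
  exact ⟨by rcases this.1 with h | h <;> omega, this.2⟩

theorem pv_min_eq (q rooms : List (Int × Int)) (hperm : q.Perm rooms)
    (hheap : PvIsHeap q) (hne : q ≠ []) :
    q.getD 0 pvD0 = rooms.getD (pvArgmin rooms) pvD0 := by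
  have h0 : 0 < q.length := by
    cases q
    · exact absurd rfl hne
    · simp
  have hrne : rooms ≠ [] := by
    intro hr
    rw [hr] at hperm
    simp [List.Perm.length_eq hperm] at h0
  have hargs := pvArgmin_spec rooms hrne
  -- the heap root is a member of rooms
  have hmemq : q.getD 0 pvD0 ∈ rooms := by
    refine hperm.mem_iff.mp ?_
    rw [List.getD_eq_getElem _ _ h0]
    exact List.getElem_mem h0
  -- the scanned minimum is a member of q
  have hmemr : rooms.getD (pvArgmin rooms) pvD0 ∈ q := by
    refine hperm.mem_iff.mpr ?_
    rw [List.getD_eq_getElem _ _ hargs.1]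
    exact List.getElem_mem hargs.1
  obtain ⟨k, hk, hkv⟩ := List.getElem_of_mem hmemq
  obtain ⟨j, hj, hjv⟩ := List.getElem_of_mem hmemr
  have h1 : pvPlt (q.getD 0 pvD0) (rooms.getD (pvArgmin rooms) pvD0) = false := by
    have := hargs.2 k hk
    rwa [List.getD_eq_getElem _ _ hk, hkv] at this
  have h2 : pvPlt (rooms.getD (pvArgmin rooms) pvD0) (q.getD 0 pvD0) = false := by
    have := pv_heap_root_min q hheap j hj
    rwa [List.getD_eq_getElem _ _ hj, hjv] at this
  exact pvPlt_connex h1 h2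

theorem pv_loop (mid : List (Int × Int × Int)) :
    ∀ (ans : List Int) (q rooms : List (Int × Int)),
      q.Perm rooms → PvIsHeap q → q ≠ [] →
      (mid.foldl pvBodyA (ans, q)).1 = (mid.foldl pvBodyB (ans, rooms)).1 := by
  induction mid with
  | nil => intro ans q rooms _ _ _; rfl
  | cons c mid ih =>
    intro ans q rooms hperm hheap hne
    rcases q with _ | ⟨a, t⟩
    · exact absurd rfl hne
    have hrne : rooms ≠ [] := by
      intro hr
      rw [hr] at hperm
      have hl := hperm.length_eq
      simp at hl
    have hj := pvArgmin_spec rooms hrne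
    have hm : (a :: t).getD 0 pvD0 = rooms.getD (pvArgmin rooms) pvD0 :=
      pv_min_eq _ _ hperm hheap (by simp)
    have hpushne : ∀ (qq : List (Int × Int)) (p : Int × Int), pvHeappush qq p ≠ [] := by
      intro qq p
      have := (pvHeappush_perm qq p).length_eq
      simp only [List.length_cons] at this
      exact List.ne_nil_of_length_pos (by omega)
    simp only [List.foldl_cons, pvBodyA, pvBodyB]
    rw [← hm]
    by_cases hcond : c.2.1 < ((a :: t).getD 0 pvD0).1
    · rw [if_pos hcond]
      rw [if_pos hcond]
      refine ih _ _ _ ?_ (pvHeappush_heap _ _ hheap) (hpushne _ _)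
      refine (pvHeappush_perm _ _).trans ?_
      refine (hperm.cons _).trans ?_
      simpa using (List.perm_middle (a := (c.2.2, c.1)) (l₁ := rooms) (l₂ := [])).symm
    · rw [if_neg hcond]
      rw [if_neg hcond]
      have hpop := pvHeappop_spec (a :: t) hheap (by simp)
      refine ih _ _ _ ?_ (pvHeappush_heap _ _ hpop.2.2) (hpushne _ _)
      have hL : (pvHeappush (pvHeappop (a :: t)).2 (c.2.2, c.1)).Perm ((c.2.2, c.1) :: t) :=
        (pvHeappush_perm _ _).trans (hpop.2.1.cons _)
      have hR : (rooms.set (pvArgmin rooms) (c.2.2, c.1)).Perm ((c.2.2, c.1) :: t) := by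
        rw [List.perm_iff_count]
        intro y
        have c1 := pv_count_set rooms (pvArgmin rooms) (c.2.2, c.1) y hj.1
        rw [← hm] at c1
        have c2 : rooms.count y = (a :: t).count y := (hperm.count_eq y).symm
        have c3 : (a :: t).count y = t.count y + (if a = y then 1 else 0) := by
          simp [List.count_cons, beq_iff_eq]
        have c4 : ((c.2.2, c.1) :: t).count y
            = t.count y + (if (c.2.2, c.1) = y then 1 else 0) := by
          simp [List.count_cons, beq_iff_eq]
        have ha : (a :: t).getD 0 pvD0 = a := rfl
        rw [ha] at c1
        omega
      exact hL.trans hR.symm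

theorem pv_bridgeA (xs : List (Int × Int × Int)) (init : List Int × List (Int × Int))
    (N : Int) (h0 : 0 ≤ N) (hlen : N ≤ (xs.length : Int)) :
    (PySem.List.pyRange 1 N).foldl
        (fun st i => pvBodyA st (PySem.List.pyGetD xs i (0, 0, 0))) init
      = ((xs.drop 1).take (N.toNat - 1)).foldl pvBodyA init := by
  have helper : ∀ (n off : Nat) (init : List Int × List (Int × Int)),
      off + n ≤ xs.length →
      (List.range n).foldl (fun st k => pvBodyA st (xs.getD (off + k) (0, 0, 0))) init
        = ((xs.drop off).take n).foldl pvBodyA init := by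
    intro n
    induction n with
    | zero => intro off init _; simp
    | succ n ihn =>
      intro off init hle
      rw [List.range_succ, List.foldl_append, List.foldl_cons, List.foldl_nil, ihn off init (by omega)]
      have hidx : (xs.drop off)[n]? = some (xs.getD (off + n) (0, 0, 0)) := by
        rw [List.getElem?_drop, List.getD_eq_getElem _ _ (by omega)]
        exact List.getElem?_eq_getElem (by omega)
      rw [List.take_add_one, hidx]
      simp
  by_cases hxe : xs = []
  · subst hxe
    have hN : N = 0 := by
      simp at hlen
      omega
    subst hN
    rw [PySem.List.pyRange_one]
    have h00 : ((0 : Int) - 1).toNat = 0 := rfl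
    rw [h00]
    simp
  · have hx1 : 0 < xs.length := List.length_pos_of_ne_nil hxe
    rw [PySem.List.pyRange_one]
    rw [List.foldl_map]
    have hfeq : (fun (st : List Int × List (Int × Int)) (k : Nat) =>
          pvBodyA st (PySem.List.pyGetD xs ((1 : Int) + (k : Nat)) (0, 0, 0)))
        = fun st k => pvBodyA st (xs.getD (1 + k) (0, 0, 0)) := by
      funext st k
      have hcast : (1 : Int) + (k : Nat) = ((1 + k : Nat) : Int) := by push_cast; ring
      rw [hcast, PySem.List.pyGetD_natCast]
    rw [hfeq]
    have hn : (N - 1).toNat = N.toNat - 1 := by omega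
    rw [hn]
    exact helper (N.toNat - 1) 1 init (by omega)

-- ===== VERDICT (by name: the statement is the Claim_ definition above) =====
theorem joyGo_spec : Claim_equal_joyGo := by
  intro N classes _dom hpre
  obtain ⟨h0, hlenI, hne, _⟩ := hpre
  show joyGo N classes = joyGo_alt N classes
  simp only [joyGo, joyGo_alt]
  have hcsl : (PySem.List.sorted2 classes (fun c => c.2.1) (fun c => c.2.2)).length
      = classes.length := (PySem.List.sorted2_perm classes _ _ false).length_eq
  have hans1 : PySem.List.pyGetD
      (PySem.List.pySetD (List.replicate (N + 1).toNat (0 : Int)) 0 1) 0 0 = 1 := by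
    rw [PySem.List.pySetD_of_nonneg _ _ (by norm_num : (0:Int) ≤ 0), PySem.List.pyGetD_zero]
    exact pv_getD_set_self _ _ _ _ (by simp; omega)
  rw [hans1]
  rw [PySem.List.slice_toNat _ (by norm_num : (0 : Int) ≤ 1) h0]
  rw [pv_bridgeA _ _ N h0 (by rw [hcsl]; exact hlenI)]
  exact pv_loop _ _ _ _ (List.Perm.refl _)
    (fun i hi hl => by simp at hl; omega) (by simp)
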